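-- pv_equiv track=rewrite | github.com/cha2hyun/TIL | Programmers/2019_KAKAO_BLIND/LV2_문자열압축/solution.py | solution
-- ===== SOURCE A (Python) =====
-- def solution(s):
--     answer = len(s)
--     for divider in range(1, len(s)//2+1):
--         # if len(s) % divider == 0:
--         result = ""
--         prev = s[0:divider]
--         cnt = 1
--         for idx in range(divider, len(s), divider):
--             if prev == s[idx : idx + divider]:
--                 cnt += 1
--             else:
--                 result += str(cnt) + prev if cnt >= 2 else prev
--                 prev = s[idx : idx + divider]
--                 cnt = 1
--         result += str(cnt) + prev if cnt >= 2 else prev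
--         answer = min(answer, len(result))
--     return answer
-- ===== SOURCE B (Python) =====
-- def solution(s):
--     n = len(s)
--     best = n
--     for d in range(1, n // 2 + 1):
--         chunks = [s[i:i + d] for i in range(0, n, d)]
--         m = len(chunks)
--         starts = [j for j in range(m) if j == 0 or chunks[j] != chunks[j - 1]]
--         ends = starts[1:] + [m]
--         total = 0
--         for a, b in zip(starts, ends):
--             k = b - a
--             total += len(chunks[a]) + (len(str(k)) if k >= 2 else 0)
--         best = min(best, total)
--     return best
-- ===== Notes on version B (the rewrite author's own statement) =====
-- stated objective: alternative
-- what changed: B keeps no running (prev,cnt) state and builds no compressed string: per block size it materialises the chunk list, computes the run START indices as the positions where a chunk differs from its predecessor (an adjacent-inequality filter), zips each start with the next start to get run lengths as index differences, and sums block length plus digit count per run; min over block sizes; never concatenating a result string avoids A's repeated string-building cost.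
import Mathlib
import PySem

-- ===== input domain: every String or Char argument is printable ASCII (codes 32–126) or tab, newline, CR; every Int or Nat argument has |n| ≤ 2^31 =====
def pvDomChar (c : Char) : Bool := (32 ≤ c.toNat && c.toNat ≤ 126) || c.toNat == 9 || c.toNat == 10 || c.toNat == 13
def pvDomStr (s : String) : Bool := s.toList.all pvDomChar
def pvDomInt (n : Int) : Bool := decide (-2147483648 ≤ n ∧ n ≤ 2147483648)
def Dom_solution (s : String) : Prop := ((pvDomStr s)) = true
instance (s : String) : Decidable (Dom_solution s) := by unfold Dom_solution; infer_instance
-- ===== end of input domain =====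

-- B finds run boundaries by an adjacent-inequality filter over the chunk list and sums costs
-- from zipped boundary-index differences, instead of A's (prev, cnt) state machine that
-- concatenates a compressed string and measures it; summing instead of concatenating measured faster on large inputs (objective: alternative).

-- ===== PORT A =====
-- A's inner-loop body: state (result, prev, cnt), scanning block start indices
def stepA (cs : List Char) (divider : Int) (st : List Char × List Char × Int) (idx : Int) :
    List Char × List Char × Int :=
  if st.2.1 == PySem.List.slice cs (some idx) (some (idx + divider)) then
    (st.1, st.2.1, st.2.2 + 1)
  else
    (st.1 ++ (if st.2.2 ≥ 2 then PySem.Int.toChars st.2.2 ++ st.2.1 else st.2.1),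
     PySem.List.slice cs (some idx) (some (idx + divider)), 1)

-- A's final 'result += str(cnt) + prev if cnt >= 2 else prev'
def finishA (st : List Char × List Char × Int) : List Char :=
  st.1 ++ (if st.2.2 ≥ 2 then PySem.Int.toChars st.2.2 ++ st.2.1 else st.2.1)

def solution (s : String) : Int :=
  let cs := s.toList
  let n := PySem.List.len cs
  (PySem.List.pyRange 1 (PySem.Int.floordiv n 2 + 1) 1).foldl
    (fun answer divider =>
      let st := (PySem.List.pyRange divider n divider).foldl (stepA cs divider)
        ([], PySem.List.slice cs (some 0) (some divider), 1)
      min answer (PySem.List.len (finishA st)))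
    n

-- ===== PORT B =====
def solution_alt (s : String) : Int :=
  let cs := s.toList
  let n := PySem.List.len cs
  (PySem.List.pyRange 1 (PySem.Int.floordiv n 2 + 1) 1).foldl
    (fun best d =>
      let chunks := (PySem.List.pyRange 0 n d).map
        (fun i => PySem.List.slice cs (some i) (some (i + d)))
      let m := PySem.List.len chunks
      let starts := (PySem.List.pyRange 0 m 1).filter
        (fun j => j == 0 || !(PySem.List.pyGetD chunks j [] == PySem.List.pyGetD chunks (j - 1) []))
      let ends := PySem.List.slice starts (some 1) none ++ [m]
      let total := (starts.zip ends).foldl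
        (fun t ab =>
          let k := ab.2 - ab.1
          t + (PySem.List.len (PySem.List.pyGetD chunks ab.1 []) +
               (if k ≥ 2 then PySem.List.len (PySem.Int.toChars k) else 0))) 0
      min best total)
    n

-- ===== PRECONDITION & SPEC =====
def Spec_solution (s : String) (out : Int) : Prop := out = solution_alt s
instance (s : String) (out : Int) : Decidable (Spec_solution s out) := by unfold Spec_solution; infer_instance

-- ===== CLAIM (what is proved, stated in full; the proofs are below) =====
def Claim_equal_solution : Prop := ∀ (s : String), Dom_solution s → Spec_solution s (solution s)

-- ===== LEMMAS AND PROOFS =====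

-- run-length bookkeeping shared by the two sides of the proof:
-- a run list (most recent run first) extended by one block
def blockRun (rs : List (List Char × Int)) (block : List Char) : List (List Char × Int) :=
  match rs with
  | (b, c) :: rest => if b == block then (b, c + 1) :: rest else (block, 1) :: (b, c) :: rest
  | [] => [(block, 1)]

-- A's inner-loop body rephrased on the run list: consume block index i
def runStep (cs : List Char) (d : Int) (rs : List (List Char × Int)) (i : Int) :
    List (List Char × Int) :=
  blockRun rs (PySem.List.slice cs (some i) (some (i + d)))

-- cost contributed by one run: len(block) + (len(str(count)) if count >= 2 else 0)
def runCost (r : List Char × Int) : Int :=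
  PySem.List.len r.1 + (if r.2 ≥ 2 then PySem.List.len (PySem.Int.toChars r.2) else 0)

-- ---- A-side: A's compressed string length = summed run costs ----

-- length of A's flush step = the cost the run list assigns to the finished run
lemma finishA_len (res prev : List Char) (cnt : Int) :
    PySem.List.len (finishA (res, prev, cnt)) = PySem.List.len res + runCost (prev, cnt) := by
  simp only [finishA, runCost]
  split_ifs with h
  · simp only [PySem.List.len_eq, List.length_append]
    push_cast; ring
  · simp only [PySem.List.len_eq, List.length_append]
    push_cast; ring

-- loop invariant: A's final compressed length over the remaining indices, plus the cost of
-- the already-closed runs, equals the emitted length so far plus the cost of the final run list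
lemma inner_eq (cs : List Char) (d : Int) :
    ∀ (L : List Int) (res prev : List Char) (cnt : Int) (rs : List (List Char × Int)),
      PySem.List.len (finishA (L.foldl (stepA cs d) (res, prev, cnt))) + (rs.map runCost).sum
        = PySem.List.len res + ((L.foldl (runStep cs d) ((prev, cnt) :: rs)).map runCost).sum := by
  intro L
  induction L with
  | nil =>
    intro res prev cnt rs
    have h := finishA_len res prev cnt
    simp only [PySem.List.len_eq] at h ⊢
    simp only [List.foldl_nil, List.map_cons, List.sum_cons]
    omega
  | cons i L ih =>
    intro res prev cnt rs
    simp only [List.foldl_cons, stepA, runStep, blockRun]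
    by_cases h : prev == PySem.List.slice cs (some i) (some (i + d))
    · simp only [h, if_pos]
      exact ih res prev (cnt + 1) rs
    · simp only [h, Bool.false_eq_true, if_neg, not_false_iff]
      have := ih (res ++ (if cnt ≥ 2 then PySem.Int.toChars cnt ++ prev else prev))
        (PySem.List.slice cs (some i) (some (i + d))) 1 ((prev, cnt) :: rs)
      simp only [List.map_cons, List.sum_cons] at this ⊢
      have hflush : PySem.List.len (res ++ (if cnt ≥ 2 then PySem.Int.toChars cnt ++ prev else prev))
          = PySem.List.len res + runCost (prev, cnt) := finishA_len res prev cnt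
      omega

-- range(0, n, d) starts with 0 and continues as range(d, n, d), for positive n, d
lemma pyRange_zero_cons (n d : Int) (hn : 0 < n) (hd : 0 < d) :
    PySem.List.pyRange 0 n d = 0 :: PySem.List.pyRange d n d := by
  rw [PySem.List.pyRange_of_pos 0 n hd, PySem.List.pyRange_of_pos d n hd]
  have h1 : (n - 0 + d - 1) / d = (n - 1) / d + 1 := by
    have := Int.add_mul_ediv_right (n - 1) 1 (by omega : d ≠ 0)
    have he : n - 0 + d - 1 = n - 1 + 1 * d := by ring
    rw [he, this]
  by_cases hnd : d < n
  · have h2 : (n - d + d - 1) = n - 1 := by ring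
    have hq : 0 ≤ (n - 1) / d := Int.ediv_nonneg (by omega) (by omega)
    rw [if_pos (by omega), if_pos hnd, h1, h2]
    have : ((n - 1) / d + 1).toNat = ((n - 1) / d).toNat + 1 := by omega
    rw [this, List.range_succ_eq_map]
    simp only [List.map_cons, List.map_map, Nat.cast_zero, mul_zero, add_zero]
    congr 1
    apply List.map_congr_left
    intro k _
    simp only [Function.comp_apply, Nat.succ_eq_add_one]
    push_cast; ring
  · have hq0 : (n - 1) / d = 0 := Int.ediv_eq_zero_of_lt (by omega) (by omega)
    rw [if_pos (by omega), if_neg hnd, h1, hq0]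
    simp

-- per divider: A's compressed length = summed run costs over the full index list
lemma divider_eq (cs : List Char) (d : Int) (hd : 1 ≤ d)
    (hdn : d ≤ PySem.Int.floordiv (PySem.List.len cs) 2) :
    PySem.List.len (finishA ((PySem.List.pyRange d (PySem.List.len cs) d).foldl (stepA cs d)
        ([], PySem.List.slice cs (some 0) (some d), 1)))
      = (((PySem.List.pyRange 0 (PySem.List.len cs) d).foldl (runStep cs d) []).map runCost).sum := by
  have hn : 0 < PySem.List.len cs := by
    have h2 : (1 : Int) ≤ PySem.Int.floordiv (PySem.List.len cs) 2 := le_trans hd hdn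
    rw [PySem.Int.le_floordiv_iff_mul_le (by omega)] at h2
    omega
  rw [pyRange_zero_cons _ _ hn (by omega)]
  simp only [List.foldl_cons, runStep, blockRun, zero_add]
  have := inner_eq cs d (PySem.List.pyRange d (PySem.List.len cs) d)
    [] (PySem.List.slice cs (some 0) (some d)) 1 []
  simpa using this

-- ---- run-list structure ----

-- runs below the top one are inert
lemma blockRun_inert (l : List (List Char)) :
    ∀ (x : List Char) (c : Int) (rs : List (List Char × Int)),
      l.foldl blockRun ((x, c) :: rs) = l.foldl blockRun [(x, c)] ++ rs := by
  induction l with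
  | nil => intro x c rs; simp
  | cons a t ih =>
    intro x c rs
    simp only [List.foldl_cons, blockRun]
    by_cases h : x == a
    · simp only [h, if_pos]
      exact ih x (c + 1) rs
    · simp only [h, Bool.false_eq_true, if_neg, not_false_iff]
      rw [ih a 1 ((x, c) :: rs), ih a 1 [(x, c)], List.append_assoc]
      rfl

-- a block of equal chunks only bumps the top counter
lemma blockRun_replicate (c : List Char) :
    ∀ (k : Nat) (j : Int), (List.replicate k c).foldl blockRun [(c, j)] = [(c, j + k)] := by
  intro k
  induction k with
  | zero => intro j; simp
  | succ k ih =>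
    intro j
    simp only [List.replicate_succ, List.foldl_cons, blockRun, BEq.rfl, if_pos]
    rw [ih (j + 1)]
    congr 1
    congr 1
    push_cast; ring

-- peeling the leading run off the fold
lemma blockRun_split (c : List Char) (k : Nat) (rest : List (List Char)) (hk : 1 ≤ k)
    (hne : ∀ r0, rest.head? = some r0 → ¬ (c == r0) = true) :
    (((List.replicate k c ++ rest).foldl blockRun []).map runCost).sum
      = runCost (c, (k : Int)) + ((rest.foldl blockRun []).map runCost).sum := by
  obtain ⟨k', rfl⟩ : ∃ k', k = k' + 1 := ⟨k - 1, by omega⟩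
  rw [List.foldl_append]
  have h0 : (List.replicate (k' + 1) c).foldl blockRun [] = [(c, ((k' + 1 : Nat) : Int))] := by
    rw [List.replicate_succ, List.foldl_cons]
    show (List.replicate k' c).foldl blockRun [(c, 1)] = _
    rw [blockRun_replicate c k' 1]
    congr 2
    push_cast; ring
  rw [h0]
  cases rest with
  | nil => simp
  | cons r0 r' =>
    have hcr : ¬ (c == r0) = true := hne r0 rfl
    simp only [List.foldl_cons, blockRun, hcr, Bool.false_eq_true, if_neg, not_false_iff]
    rw [blockRun_inert r' r0 1 [(c, ((k' + 1 : Nat) : Int))]]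
    simp only [List.map_append, List.sum_append, List.map_cons, List.map_nil, List.sum_cons,
      List.sum_nil]
    ring

-- ---- B-side: Nat-indexed boundary computation ----

-- the boundary predicate: position j starts a new run
def pN (l : List (List Char)) (j : Nat) : Bool :=
  j == 0 || !(l.getD j [] == l.getD (j - 1) [])

-- run start positions
def startsN (l : List (List Char)) : List Nat := (List.range l.length).filter (pN l)

-- cost of the run [a, b): block length + digits of the count when ≥ 2
def pairCost (l : List (List Char)) (ab : Nat × Nat) : Int :=
  ((l.getD ab.1 []).length : Int) +
    (if ((ab.2 : Int) - (ab.1 : Int)) ≥ 2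
     then PySem.List.len (PySem.Int.toChars ((ab.2 : Int) - (ab.1 : Int))) else 0)

-- B's per-divider total, Nat-indexed
def bsumN (l : List (List Char)) : Int :=
  (((startsN l).zip ((startsN l).drop 1 ++ [l.length])).map (pairCost l)).sum

lemma getD_repl_append_lt (c : List Char) (k : Nat) (rest : List (List Char)) (i : Nat)
    (h : i < k) : (List.replicate k c ++ rest).getD i [] = c := by
  rw [List.getD_append _ _ _ _ (by simpa using h)]
  simp [List.getD, h]

lemma getD_repl_append_ge (c : List Char) (k : Nat) (rest : List (List Char)) (i : Nat) :
    (List.replicate k c ++ rest).getD (k + i) [] = rest.getD i [] := by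
  rw [List.getD_append_right _ _ _ _ (by simp)]
  simp

-- the start positions of 'replicate k c ++ rest' are 0 and rest's starts shifted by k
lemma startsN_split (c : List Char) (k : Nat) (rest : List (List Char)) (hk : 1 ≤ k)
    (hne : ∀ r0, rest.head? = some r0 → ¬ (c == r0) = true) :
    startsN (List.replicate k c ++ rest) = 0 :: (startsN rest).map (k + ·) := by
  unfold startsN
  have hlen : (List.replicate k c ++ rest).length = k + rest.length := by simp
  rw [hlen, List.range_add, List.filter_append]
  have hfirst : (List.range k).filter (pN (List.replicate k c ++ rest)) = [0] := by
    obtain ⟨k', rfl⟩ : ∃ k', k = k' + 1 := ⟨k - 1, by omega⟩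
    rw [List.range_succ_eq_map, List.filter_cons]
    rw [if_pos (by simp [pN])]
    have : (List.map Nat.succ (List.range k')).filter (pN (List.replicate (k' + 1) c ++ rest)) = [] := by
      rw [List.filter_eq_nil_iff]
      intro a ha
      obtain ⟨j, hj, rfl⟩ := by simpa using ha
      have h1 : (List.replicate (k' + 1) c ++ rest).getD (j + 1) [] = c :=
        getD_repl_append_lt c (k' + 1) rest (j + 1) (by omega)
      have h2 : (List.replicate (k' + 1) c ++ rest).getD (j + 1 - 1) [] = c :=
        getD_repl_append_lt c (k' + 1) rest j (by omega)
      simp only [pN, Bool.or_eq_true, not_or]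
      rw [h1, h2]
      simp
    rw [this]
  rw [hfirst]
  have hsecond : ((List.range rest.length).map (k + ·)).filter (pN (List.replicate k c ++ rest))
      = ((List.range rest.length).filter (pN rest)).map (k + ·) := by
    rw [List.filter_map]
    congr 1
    apply List.filter_congr
    intro i hi
    rw [List.mem_range] at hi
    simp only [Function.comp_apply]
    cases i with
    | zero =>
      have hrest : ∃ r0 r', rest = r0 :: r' := by
        cases rest with
        | nil => simp at hi
        | cons r0 r' => exact ⟨r0, r', rfl⟩
      obtain ⟨r0, r', rfl⟩ := hrest
      have h1 : (List.replicate k c ++ r0 :: r').getD (k + 0) [] = r0 := by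
        rw [getD_repl_append_ge]; rfl
      have h2 : (List.replicate k c ++ r0 :: r').getD (k + 0 - 1) [] = c := by
        have he : k + 0 - 1 = k - 1 := by omega
        rw [he]
        exact getD_repl_append_lt c k (r0 :: r') (k - 1) (by omega)
      have hcr : ¬ (c == r0) = true := hne r0 rfl
      have hrc : (r0 == c) = false := by
        rw [beq_eq_false_iff_ne]
        intro h
        exact hcr (by simp [h])
      have hk0 : (k + 0 == 0) = false := by
        rw [beq_eq_false_iff_ne]; omega
      calc pN (List.replicate k c ++ r0 :: r') (k + 0)
          = true := by
            simp only [pN, hk0, Bool.false_or]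
            rw [h1, h2, hrc]
            rfl
        _ = pN (r0 :: r') 0 := by simp [pN]
    | succ j =>
      have h1 : (List.replicate k c ++ rest).getD (k + (j + 1)) [] = rest.getD (j + 1) [] :=
        getD_repl_append_ge c k rest (j + 1)
      have h2 : (List.replicate k c ++ rest).getD (k + (j + 1) - 1) [] = rest.getD j [] := by
        have he : k + (j + 1) - 1 = k + j := by omega
        rw [he]
        exact getD_repl_append_ge c k rest j
      have hk1 : (k + (j + 1) == 0) = false := by
        rw [beq_eq_false_iff_ne]; omega
      have hj1 : (j + 1 == 0) = false := by
        rw [beq_eq_false_iff_ne]; omega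
      simp only [pN, hk1, hj1, Bool.false_or]
      rw [h1, h2]
      have he2 : j + 1 - 1 = j := by omega
      rw [he2]
  rw [hsecond]
  rfl

-- shifting both indices of a run pair past the leading block leaves its cost unchanged
lemma pairCost_shift (c : List Char) (k : Nat) (rest : List (List Char)) (ab : Nat × Nat) :
    pairCost (List.replicate k c ++ rest) (k + ab.1, k + ab.2) = pairCost rest ab := by
  unfold pairCost
  rw [getD_repl_append_ge]
  have h : ((k + ab.2 : Nat) : Int) - ((k + ab.1 : Nat) : Int) = (ab.2 : Int) - (ab.1 : Int) := by
    push_cast; ring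
  rw [h]

-- a nonempty list's first run starts at 0
lemma startsN_cons (r0 : List Char) (r' : List (List Char)) :
    startsN (r0 :: r') = 0 :: ((List.range r'.length).map Nat.succ).filter (pN (r0 :: r')) := by
  unfold startsN
  simp only [List.length_cons]
  rw [List.range_succ_eq_map, List.filter_cons, if_pos (by simp [pN])]

-- main correspondence: B's boundary sum = summed run costs of the run-list fold
lemma bsum_eq_runs : ∀ (l : List (List Char)),
    bsumN l = ((l.foldl blockRun []).map runCost).sum := by
  suffices H : ∀ (n : Nat) (l : List (List Char)), l.length = n →
      bsumN l = ((l.foldl blockRun []).map runCost).sum by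
    intro l; exact H l.length l rfl
  intro n
  induction n using Nat.strong_induction_on with
  | _ n ih =>
    intro l hl
    cases l with
    | nil => simp [bsumN, startsN]
    | cons c t =>
      -- span decomposition: c :: t = replicate k c ++ rest
      have hlr : t.takeWhile (· == c) ++ t.dropWhile (· == c) = t := List.takeWhile_append_dropWhile
      have hrepl : t.takeWhile (· == c) = List.replicate (t.takeWhile (· == c)).length c := by
        apply List.eq_replicate_of_mem
        intro b hb
        have := List.mem_takeWhile_imp hb
        simpa [beq_iff_eq] using this
      have hdecomp : c :: t
          = List.replicate ((t.takeWhile (· == c)).length + 1) c ++ t.dropWhile (· == c) := by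
        conv_lhs => rw [← hlr]
        rw [List.replicate_succ, List.cons_append]
        exact congrArg (c :: ·) (congrArg (· ++ t.dropWhile (· == c)) hrepl)
      have hne : ∀ r0, (t.dropWhile (· == c)).head? = some r0 → ¬ (c == r0) = true := by
        intro r0 hr0 hc
        have hh := List.head?_dropWhile_not (· == c) t
        rw [hr0] at hh
        simp only at hh
        rw [beq_iff_eq] at hc
        subst hc
        simp at hh
      have hrl : (t.dropWhile (· == c)).length < n := by
        have h1 : (t.dropWhile (· == c)).length ≤ t.length := List.length_dropWhile_le _ _
        simp only [← hl, List.length_cons]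
        omega
      -- abstract the decomposition: k ≥ 1, rest with a different head, rest shorter
      generalize hK : (t.takeWhile (· == c)).length + 1 = k at hdecomp
      generalize hR : t.dropWhile (· == c) = rest at hdecomp hne hrl
      have hk : 1 ≤ k := by omega
      have ihr : bsumN rest = ((rest.foldl blockRun []).map runCost).sum :=
        ih rest.length hrl rest rfl
      rw [hdecomp, blockRun_split c k rest hk hne, ← ihr]
      unfold bsumN
      rw [startsN_split c k rest hk hne]
      have hlen2 : (List.replicate k c ++ rest).length = k + rest.length := by simp
      rw [hlen2]
      have hfirst : pairCost (List.replicate k c ++ rest) (0, k + 0) = runCost (c, (k : Int)) := by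
        have hg : (List.replicate k c ++ rest).getD 0 [] = c :=
          getD_repl_append_lt c k rest 0 (by omega)
        simp only [pairCost, runCost]
        rw [hg]
        have h0 : ((k + 0 : Nat) : Int) - ((0 : Nat) : Int) = (k : Int) := by push_cast; ring
        rw [h0]
        simp [PySem.List.len_eq]
      cases hsr : startsN rest with
      | nil =>
        -- no starts means rest = []
        have hrnil : rest = [] := by
          cases hre : rest with
          | nil => rfl
          | cons r0 r' =>
            exfalso
            have := startsN_cons r0 r'
            rw [← hre, hsr] at this
            simp at this
        subst hrnil
        have hg : (List.replicate k c ++ ([] : List (List Char))).getD 0 [] = c :=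
          getD_repl_append_lt c k [] 0 (by omega)
        simp only [List.map_nil, List.drop_one, List.tail_cons, List.nil_append,
          List.length_nil, List.zip_cons_cons, List.zip_nil_right,
          List.zip_nil_left, List.map_cons, List.sum_cons, List.sum_nil, List.map_nil, add_zero]
        simp only [pairCost, runCost]
        rw [hg]
        have h0 : ((k : Nat) : Int) - ((0 : Nat) : Int) = (k : Int) := by push_cast; ring
        rw [h0]
        simp [PySem.List.len_eq]
      | cons s0 sr' =>
        have hs0 : s0 = 0 := by
          have hrne : rest ≠ [] := by
            intro h
            rw [h] at hsr
            simp [startsN] at hsr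
          obtain ⟨r0, r', hre⟩ := List.exists_cons_of_ne_nil hrne
          rw [hre, startsN_cons] at hsr
          exact (List.cons_eq_cons.mp hsr).1.symm
        subst hs0
        -- starts = 0 :: (k+0) :: map (k+·) sr'; the tail zip is rest's zip shifted by k
        simp only [List.map_cons, List.drop_one, List.tail_cons]
        rw [List.cons_append, List.zip_cons_cons, List.map_cons, List.sum_cons, hfirst]
        congr 1
        have hz1 : ((k + 0) :: List.map (k + ·) sr') = List.map (k + ·) (0 :: sr') := by simp
        have hz2 : (List.map (k + ·) sr' ++ [k + rest.length])
            = List.map (k + ·) (sr' ++ [rest.length]) := by simp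
        rw [hz1, hz2, List.zip_map, List.map_map]
        refine congrArg List.sum (List.map_congr_left ?_)
        intro ab _
        obtain ⟨a, b⟩ := ab
        show pairCost (List.replicate k c ++ rest) (k + a, k + b) = pairCost rest (a, b)
        exact pairCost_shift c k rest (a, b)

-- bridge: B's per-divider Int-level computation equals the Nat-indexed boundary sum
lemma btotal_eq_bsum (chunks : List (List Char)) :
    (((((PySem.List.pyRange 0 (PySem.List.len chunks) 1).filter
          (fun j => j == 0 ||
            !(PySem.List.pyGetD chunks j [] == PySem.List.pyGetD chunks (j - 1) []))).zip
        (PySem.List.slice ((PySem.List.pyRange 0 (PySem.List.len chunks) 1).filter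
          (fun j => j == 0 ||
            !(PySem.List.pyGetD chunks j [] == PySem.List.pyGetD chunks (j - 1) [])))
          (some 1) none ++ [PySem.List.len chunks]))).foldl
      (fun t ab =>
        t + (PySem.List.len (PySem.List.pyGetD chunks ab.1 []) +
             (if ab.2 - ab.1 ≥ 2 then PySem.List.len (PySem.Int.toChars (ab.2 - ab.1)) else 0))) 0)
      = bsumN chunks := by
  have hstarts : (PySem.List.pyRange 0 (PySem.List.len chunks) 1).filter
        (fun j => j == 0 ||
          !(PySem.List.pyGetD chunks j [] == PySem.List.pyGetD chunks (j - 1) []))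
      = List.map (Nat.cast : Nat → Int) (startsN chunks) := by
    rw [PySem.List.len_eq, PySem.List.pyRange_zero_natCast, List.filter_map]
    unfold startsN
    refine congrArg (List.map _) (List.filter_congr ?_)
    intro j _
    simp only [Function.comp_apply, pN]
    by_cases hj : j = 0
    · subst hj; simp
    · have hj0 : ((j : Int) == 0) = false := by simp [hj]
      have hjn : (j == 0) = false := by simp [hj]
      have hc1 : ((j : Int) - 1) = ((j - 1 : Nat) : Int) := by omega
      simp only [hj0, hjn, Bool.false_or, hc1, PySem.List.pyGetD_natCast]
  rw [hstarts, PySem.List.slice_from_one, ← List.drop_one, ← List.map_drop]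
  have hm : [PySem.List.len chunks] = List.map (Nat.cast : Nat → Int) [chunks.length] := by
    simp [PySem.List.len_eq]
  rw [hm, ← List.map_append, List.zip_map]
  rw [PySem.List.foldl_add
    (g := fun ab : Int × Int =>
      PySem.List.len (PySem.List.pyGetD chunks ab.1 []) +
        (if ab.2 - ab.1 ≥ 2 then PySem.List.len (PySem.Int.toChars (ab.2 - ab.1)) else 0))]
  unfold bsumN
  rw [zero_add, List.map_map]
  refine congrArg List.sum (List.map_congr_left ?_)
  intro ab _
  obtain ⟨a, b⟩ := ab
  show PySem.List.len (PySem.List.pyGetD chunks ((a : Nat) : Int) []) +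
      (if ((b : Nat) : Int) - ((a : Nat) : Int) ≥ 2
       then PySem.List.len (PySem.Int.toChars (((b : Nat) : Int) - ((a : Nat) : Int))) else 0)
    = pairCost chunks (a, b)
  simp [pairCost, PySem.List.pyGetD_natCast, PySem.List.len_eq]

-- ===== VERDICT (by name: the statement is the Claim_ definition above) =====
theorem solution_spec : Claim_equal_solution := by
  intro s _
  unfold Spec_solution solution solution_alt
  simp only []
  apply PySem.List.foldl_congr_mem
  intro acc d hmem
  rw [PySem.List.mem_pyRange_one] at hmem
  congr 1
  rw [divider_eq s.toList d hmem.1 (by omega)]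
  rw [btotal_eq_bsum]
  rw [bsum_eq_runs]
  rw [List.foldl_map]
  rfl
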